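-- pv_equiv track=rewrite | github.com/pbaletkeman/python-to-cython-converter | cython_formatter.py | inject_cython_lines
-- ===== SOURCE A (Python) =====
-- def inject_cython_lines(lines):
--     formatted = []
--     indent_stack = [0]
--     for line in lines:
--         stripped = line.strip()
--
--         # Handle cdef lines
--         if stripped.startswith("cdef "):
--             indent = "    " * indent_stack[-1]
--             formatted.append(indent + stripped)
--             continue
--
--         # Handle prange loops
--         if "prange(" in stripped:
--             indent = "    " * indent_stack[-1]
--             formatted.append(indent + stripped)
--             indent_stack.append(indent_stack[-1] + 1)
--             continue
--
--         # Handle with nogil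
--         if "with nogil:" in stripped:
--             indent = "    " * indent_stack[-1]
--             formatted.append(indent + stripped)
--             indent_stack.append(indent_stack[-1] + 1)
--             continue
--
--         # Handle return or end of block
--         if stripped.startswith("return") or stripped == "":
--             if len(indent_stack) > 1:
--                 indent_stack.pop()
--             indent = "    " * indent_stack[-1]
--             formatted.append(indent + stripped)
--             continue
--
--         # Default line
--         indent = "    " * indent_stack[-1]
--         formatted.append(indent + stripped)
--
--     return formatted
-- ===== SOURCE B (Python) =====
-- def _delta(s):
--     """Stripped line -> (delta before printing, delta after printing)."""
--     if s.startswith("cdef "):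
--         return (0, 0)
--     if "prange(" in s or "with nogil:" in s:
--         return (0, 1)
--     if s.startswith("return") or s == "":
--         return (-1, 0)
--     return (0, 0)
--
-- def inject_cython_lines(lines):
--     # Staged pipeline.  The original's floor-at-zero indent walk is replaced by
--     # the Lindley closed form: the printed depth equals the running sum of the
--     # deltas minus its running minimum (p - m), with no clamping conditional.
--     stripped = [line.strip() for line in lines]
--     deltas = [_delta(s) for s in stripped]
--     depths = []
--     p = m = 0
--     for pre, post in deltas:
--         p += pre
--         if p < m:
--             m = p
--         depths.append(p - m)
--         p += post
--     return ["    " * d + s for d, s in zip(depths, stripped)]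
-- ===== Notes on version B (the rewrite author's own statement) =====
-- stated objective: alternative
-- what changed: Replaces the single-pass clamped indent-stack walk by a staged pipeline (strip all lines, map each to a (pre,post) delta pair, then compute each printed depth with the Lindley closed form: running delta sum minus its running minimum, no clamping conditional, and finally zip depths with stripped lines).
import Mathlib
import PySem

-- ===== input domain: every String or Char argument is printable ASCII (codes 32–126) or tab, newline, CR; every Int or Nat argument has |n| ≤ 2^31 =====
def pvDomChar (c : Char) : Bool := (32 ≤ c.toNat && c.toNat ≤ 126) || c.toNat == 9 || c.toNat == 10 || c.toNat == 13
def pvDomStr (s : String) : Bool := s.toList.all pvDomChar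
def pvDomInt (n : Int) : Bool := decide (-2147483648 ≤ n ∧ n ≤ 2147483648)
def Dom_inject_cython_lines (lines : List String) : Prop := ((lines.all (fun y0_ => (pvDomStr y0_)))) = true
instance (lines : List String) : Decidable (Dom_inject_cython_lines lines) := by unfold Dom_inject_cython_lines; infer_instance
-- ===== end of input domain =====

-- B replaces A's single-pass clamped indent-stack walk by a staged pipeline (strip, delta pairs,
-- Lindley closed-form depths = running sum minus running minimum, zip); objective: alternative (same cost).

-- Python's '"    " * n' (shared by both ports)
def pyMulStr (s : String) (n : Int) : String := String.ofList (PySem.List.pyRepeat s.toList n)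

-- Python's 'x + y' on str (shared by both ports; via toList so the kernel can reduce it)
def pyCat (a b : String) : String := String.ofList (a.toList ++ b.toList)

-- ===== PORT A =====
-- loop body of A; state = (formatted, indent_stack). indent_stack[-1] ported as pyGetD … (-1) 0
-- (exact: the stack is never empty, so Python never raises); indent_stack.pop() under the
-- 'len > 1' guard ported as dropLast (exact on a nonempty list).
def injectA_step (st : List String × List Int) (line : String) : List String × List Int :=
  let stripped := PySem.Str.strip line
  if PySem.Str.startswith stripped "cdef " then
    (st.1 ++ [pyCat (pyMulStr "    " (PySem.List.pyGetD st.2 (-1) 0)) stripped], st.2)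
  else if PySem.Str.isIn "prange(" stripped then
    let top := PySem.List.pyGetD st.2 (-1) 0
    (st.1 ++ [pyCat (pyMulStr "    " top) stripped], st.2 ++ [top + 1])
  else if PySem.Str.isIn "with nogil:" stripped then
    let top := PySem.List.pyGetD st.2 (-1) 0
    (st.1 ++ [pyCat (pyMulStr "    " top) stripped], st.2 ++ [top + 1])
  else if PySem.Str.startswith stripped "return" || stripped == "" then
    let stack' := if st.2.length > 1 then st.2.dropLast else st.2
    (st.1 ++ [pyCat (pyMulStr "    " (PySem.List.pyGetD stack' (-1) 0)) stripped], stack')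
  else
    (st.1 ++ [pyCat (pyMulStr "    " (PySem.List.pyGetD st.2 (-1) 0)) stripped], st.2)

def inject_cython_lines (lines : List String) : List String :=
  (lines.foldl injectA_step ([], [0])).1

-- ===== PORT B =====
-- Source B's _delta: stripped line -> (delta before printing, delta after printing)
def inject_delta (s : String) : Int × Int :=
  if PySem.Str.startswith s "cdef " then (0, 0)
  else if PySem.Str.isIn "prange(" s || PySem.Str.isIn "with nogil:" s then (0, 1)
  else if PySem.Str.startswith s "return" || s == "" then (-1, 0)
  else (0, 0)

-- Source B's depth loop body; state = (depths, p, m)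
def depthStep (st : List Int × Int × Int) (d : Int × Int) : List Int × Int × Int :=
  let p := st.2.1 + d.1
  let m := if p < st.2.2 then p else st.2.2
  (st.1 ++ [p - m], p + d.2, m)

def inject_cython_lines_alt (lines : List String) : List String :=
  let stripped := lines.map PySem.Str.strip
  let deltas := stripped.map inject_delta
  let depths := (deltas.foldl depthStep ([], 0, 0)).1
  (depths.zip stripped).map (fun z => pyCat (pyMulStr "    " z.1) z.2)

-- ===== PRECONDITION & SPEC =====
def Spec_inject_cython_lines (lines : List String) (out : List String) : Prop := out = inject_cython_lines_alt lines
instance (lines : List String) (out : List String) : Decidable (Spec_inject_cython_lines lines out) := by unfold Spec_inject_cython_lines; infer_instance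

-- ===== CLAIM (what is proved, stated in full; the proofs are below) =====
def Claim_equal_inject_cython_lines : Prop := ∀ (lines : List String), Dom_inject_cython_lines lines → Spec_inject_cython_lines lines (inject_cython_lines lines)

-- ===== LEMMAS AND PROOFS =====

-- A's stack after processing any prefix is always [0, 1, …, n]
def stackOf : Nat → List Int
  | 0 => [0]
  | n + 1 => stackOf n ++ [(n : Int) + 1]

theorem stackOf_length (n : Nat) : (stackOf n).length = n + 1 := by
  induction n with
  | zero => rfl
  | succ n ih => simp [stackOf, ih]

theorem stackOf_last (n : Nat) : PySem.List.pyGetD (stackOf n) (-1) 0 = (n : Int) := by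
  cases n with
  | zero => rfl
  | succ n =>
    simp [stackOf, PySem.List.pyGetD, PySem.List.pyGet?, PySem.List.pyIdx?, stackOf_length]

theorem stackOf_dropLast (n : Nat) : (stackOf (n + 1)).dropLast = stackOf n := by
  simp [stackOf]

-- characterisation of A's step through inject_delta: the new depth is n - 1 (Nat floor) on a
-- pre-decrement line, and the post-delta is pushed onto the stack
theorem injectA_step_char (out : List String) (n : Nat) (line : String) :
    injectA_step (out, stackOf n) line =
      (out ++ [pyCat (pyMulStr "    "
          ((if (inject_delta (PySem.Str.strip line)).1 < 0 then n - 1 else n : Nat) : Int))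
          (PySem.Str.strip line)],
        stackOf ((if (inject_delta (PySem.Str.strip line)).1 < 0 then n - 1 else n)
          + (inject_delta (PySem.Str.strip line)).2.toNat)) := by
  unfold injectA_step inject_delta
  dsimp only
  by_cases h1 : PySem.Str.startswith (PySem.Str.strip line) "cdef " = true
  · simp_all [stackOf_last]
  by_cases h2 : PySem.Str.isIn "prange(" (PySem.Str.strip line) = true
  · simp_all [stackOf_last, stackOf]
  by_cases h3 : PySem.Str.isIn "with nogil:" (PySem.Str.strip line) = true
  · simp_all [stackOf_last, stackOf]
  by_cases h4 : (PySem.Str.startswith (PySem.Str.strip line) "return" || (PySem.Str.strip line == "")) = true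
  · cases n with
    | zero => simp_all [stackOf, PySem.List.pyGetD, PySem.List.pyGet?, PySem.List.pyIdx?]
    | succ m =>
      have hlen : 1 < (stackOf (m + 1)).length := by simp [stackOf_length]
      simp_all [stackOf_dropLast, stackOf_last]
  · simp_all [stackOf_last]

-- characterisation of B's depth step: with m ≤ p, m ≤ 0, the emitted depth p' - m' is the
-- clamped decrement of p - m and the new state keeps the invariant
theorem depthStep_char (ds : List Int) (p m : Int) (d : Int × Int)
    (hmp : m ≤ p) (hm0 : m ≤ 0) (hd : d = (0, 0) ∨ d = (0, 1) ∨ d = (-1, 0)) :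
    depthStep (ds, p, m) d =
      (ds ++ [(((if d.1 < 0 then (p - m).toNat - 1 else (p - m).toNat) : Nat) : Int)],
        p + d.1 + d.2, if p + d.1 < m then p + d.1 else m) ∧
      (if p + d.1 < m then p + d.1 else m) ≤ p + d.1 + d.2 ∧
      (if p + d.1 < m then p + d.1 else m) ≤ 0 ∧
      (p + d.1 + d.2 - (if p + d.1 < m then p + d.1 else m)).toNat =
        (if d.1 < 0 then (p - m).toNat - 1 else (p - m).toNat) + d.2.toNat := by
  rcases hd with h | h | h <;> subst h <;>
    refine ⟨by simp [depthStep]; split_ifs <;> omega, by split_ifs <;> omega,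
      by split_ifs <;> omega, by split_ifs <;> omega⟩

-- the depths fold appends to its accumulator
theorem depthStep_foldl_acc (l : List (Int × Int)) : ∀ (ds : List Int) (p m : Int),
    (l.foldl depthStep (ds, p, m)).1 = ds ++ (l.foldl depthStep ([], p, m)).1 := by
  induction l with
  | nil => intro ds p m; simp
  | cons d rest ih =>
    intro ds p m
    simp only [List.foldl_cons, depthStep, List.nil_append]
    rw [ih (ds ++ _), ih [_]]
    simp

-- main loop correspondence
theorem inject_loop_corr (lines : List String) : ∀ (out : List String) (p m : Int),
    m ≤ p → m ≤ 0 →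
    (lines.foldl injectA_step (out, stackOf (p - m).toNat)).1 =
      out ++ (((((lines.map PySem.Str.strip).map inject_delta).foldl depthStep ([], p, m)).1.zip
        (lines.map PySem.Str.strip)).map (fun z => pyCat (pyMulStr "    " z.1) z.2)) := by
  induction lines with
  | nil => intro out p m _ _; simp
  | cons line rest ih =>
    intro out p m hmp hm0
    have hd : inject_delta (PySem.Str.strip line) = (0, 0) ∨
        inject_delta (PySem.Str.strip line) = (0, 1) ∨
        inject_delta (PySem.Str.strip line) = (-1, 0) := by
      unfold inject_delta; split_ifs <;> simp
    obtain ⟨hstep, hinv1, hinv2, hcast⟩ :=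
      depthStep_char [] p m (inject_delta (PySem.Str.strip line)) hmp hm0 hd
    simp only [List.map_cons, List.foldl_cons]
    rw [hstep, depthStep_foldl_acc]
    rw [injectA_step_char out ((p - m).toNat) line]
    rw [← hcast] at *
    rw [ih _ _ _ hinv1 hinv2]
    simp [List.zip_cons_cons]

-- ===== VERDICT (by name: the statement is the Claim_ definition above) =====
theorem inject_cython_lines_spec : Claim_equal_inject_cython_lines := by
  intro lines _
  unfold Spec_inject_cython_lines inject_cython_lines inject_cython_lines_alt
  have h := inject_loop_corr lines [] 0 0 le_rfl le_rfl
  simpa using h
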